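-- pv_equiv track=rewrite | github.com/YannickEngel/AdventOfCode | day_12.py | isEligible
-- ===== SOURCE A (Python) =====
-- def isEligible(cave, currentPath):
--     if cave == 'start':
--         return False
--     if (cave == 'end' and currentPath.count('end') == 0) or (not cave.islower()):
--         return True
--
--     if (cave in currentPath):
--         for cav in currentPath:
--             if currentPath.count(cav) > 1 and cav.islower():
--                 return False
--
--     return True
-- ===== SOURCE B (Python) =====
-- def isEligible(cave, currentPath):
--     if cave == 'start':
--         return False
--     if not cave.islower() or (cave == 'end' and 'end' not in currentPath):
--         return True
--     if cave not in currentPath: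
--         return True
--     s = sorted(currentPath)
--     return all(not (a == b and a.islower()) for a, b in zip(s, s[1:]))
-- ===== Notes on version B (the rewrite author's own statement) =====
-- stated objective: alternative
-- what changed: A's nested scan (for each cave in the path, an inner count plus islower test with early return) is replaced by sorting the path and scanning adjacent pairs once: a duplicated small cave shows up as two equal lowercase neighbours in the sorted list; the guard branches become early returns.
import Mathlib
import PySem

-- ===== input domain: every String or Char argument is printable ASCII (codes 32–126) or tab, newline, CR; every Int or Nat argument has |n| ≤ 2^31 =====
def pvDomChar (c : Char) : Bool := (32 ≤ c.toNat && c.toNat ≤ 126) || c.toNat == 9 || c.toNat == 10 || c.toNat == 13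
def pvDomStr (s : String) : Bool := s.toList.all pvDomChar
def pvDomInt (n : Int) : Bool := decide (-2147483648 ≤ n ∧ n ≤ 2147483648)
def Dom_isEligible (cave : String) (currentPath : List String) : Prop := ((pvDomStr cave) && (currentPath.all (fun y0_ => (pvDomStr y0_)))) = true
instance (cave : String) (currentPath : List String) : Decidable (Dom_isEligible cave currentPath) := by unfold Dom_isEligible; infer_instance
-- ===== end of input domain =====

-- B replaces A's nested count-scan early-return loop by SORTING the path and scanning
-- adjacent pairs for an equal lowercase neighbour (duplicates are adjacent after sorting);
-- objective: alternative algorithm.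

-- shared primitive: Python str.islower() (no PySem whole-string form); exact on the ASCII domain,
-- where the cased characters are exactly the letters: at least one cased char, none uppercase.
def strIslower (s : String) : Bool :=
  (s.toList.any fun c => PySem.Chars.isupper c || PySem.Chars.islower c) &&
  (s.toList.all fun c => !PySem.Chars.isupper c)

-- ===== PORT A =====
-- A's early-return scan: first cav in the path with count > 1 and islower() gives False
def loopA (path : List String) : List String → Bool
  | [] => true
  | cav :: rest =>
      if PySem.List.count path cav > 1 && strIslower cav then false else loopA path rest

def isEligible (cave : String) (currentPath : List String) : Bool :=
  if cave == "start" then false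
  else if (cave == "end" && PySem.List.count currentPath "end" == 0) || !strIslower cave then true
  else if currentPath.contains cave then loopA currentPath currentPath
  else true

-- ===== PORT B =====
-- Source B: s = sorted(currentPath); all(not (a == b and a.islower()) for a, b in zip(s, s[1:]))
def isEligible_alt (cave : String) (currentPath : List String) : Bool :=
  if cave == "start" then false
  else if !strIslower cave || (cave == "end" && !currentPath.contains "end") then true
  else if !currentPath.contains cave then true
  else
    let s := PySem.List.sorted currentPath (fun x => x) false
    (s.zip (PySem.List.slice s (some 1) none)).all fun p => !(p.1 == p.2 && strIslower p.1)

-- ===== PRECONDITION & SPEC =====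
def Spec_isEligible (cave : String) (currentPath : List String) (out : Bool) : Prop := out = isEligible_alt cave currentPath
instance (cave : String) (currentPath : List String) (out : Bool) : Decidable (Spec_isEligible cave currentPath out) := by unfold Spec_isEligible; infer_instance

-- ===== CLAIM (what is proved, stated in full; the proofs are below) =====
def Claim_equal_isEligible : Prop := ∀ (cave : String) (currentPath : List String), Dom_isEligible cave currentPath → Spec_isEligible cave currentPath (isEligible cave currentPath)

-- ===== LEMMAS AND PROOFS =====

-- A's loop is the negated 'some cave occurs twice and is lowercase'
theorem loopA_eq (path l : List String) :
    loopA path l = !(l.any fun cav => decide (1 < PySem.List.count path cav) && strIslower cav) := by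
  induction l with
  | nil => rfl
  | cons cav rest ih =>
      simp only [loopA, List.any_cons]
      split
      · next h => simp only [h, Bool.true_or, Bool.not_true]
      · next h =>
          simp only [Bool.not_eq_true] at h
          simp only [h, Bool.false_or]
          exact ih

-- on a sorted list, an adjacent equal lowercase pair is exactly a lowercase [c,c] sublist
theorem zipAny_iff (l : List String) (h : l.Pairwise (· ≤ ·)) :
    (((l.zip l.tail).any fun p => p.1 == p.2 && strIslower p.1) = true)
      ↔ ∃ c, List.Sublist [c, c] l ∧ strIslower c = true := by
  induction l with
  | nil => simp
  | cons a t ih =>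
      have ht : t.Pairwise (· ≤ ·) := (List.pairwise_cons.mp h).2
      have ha : ∀ x ∈ t, a ≤ x := (List.pairwise_cons.mp h).1
      cases t with
      | nil =>
          constructor
          · intro hf; simp at hf
          · rintro ⟨c, hsub, -⟩
            have := hsub.length_le; simp at this
      | cons b t' =>
          have ihb := ih ht
          simp only [List.tail_cons, List.zip_cons_cons, List.any_cons, Bool.or_eq_true,
            Bool.and_eq_true, beq_iff_eq] at ihb ⊢
          constructor
          · rintro (⟨hab, hl⟩ | hrest)
            · exact ⟨a, by rw [hab]; exact (List.cons_sublist_cons.mpr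
                (List.cons_sublist_cons.mpr (List.nil_sublist t'))), hl⟩
            · obtain ⟨c, hsub, hl⟩ := ihb.mp hrest
              exact ⟨c, hsub.cons a, hl⟩
          · rintro ⟨c, hsub, hl⟩
            rcases List.sublist_cons_iff.mp hsub with hsub' | ⟨r, hr, hrsub⟩
            · exact Or.inr (ihb.mpr ⟨c, hsub', hl⟩)
            · -- [c,c] = a :: r : so c = a and c ∈ b :: t'; sortedness forces a = b
              injection hr with hca hr'
              have hcmem : c ∈ b :: t' := by
                have hcr : c ∈ r := by rw [← hr']; simp
                exact hrsub.mem hcr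
              have hcb : c = b := by
                rcases List.mem_cons.mp hcmem with h1 | h1
                · exact h1
                · have h2 : b ≤ c := (List.pairwise_cons.mp ht).1 c h1
                  have h3 : c ≤ b := by rw [hca]; exact ha b (by simp)
                  exact le_antisymm h3 h2
              refine Or.inl ⟨by rw [← hca]; exact hcb, by rw [← hca]; exact hl⟩

-- the 'no small cave twice' tests of A and B agree on the sorted path
theorem key (path : List String) :
    (!(path.any fun cav => decide (1 < PySem.List.count path cav) && strIslower cav))
      = (let s := PySem.List.sorted path (fun x => x) false
         (s.zip (PySem.List.slice s (some 1) none)).all fun p => !(p.1 == p.2 && strIslower p.1)) := by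
  have hslice : PySem.List.slice (PySem.List.sorted path (fun x => x) false) (some 1) none
      = (PySem.List.sorted path (fun x => x) false).tail := PySem.List.slice_from_one _
  have hperm : (PySem.List.sorted path (fun x => x) false).Perm path :=
    PySem.List.sorted_perm path (fun x => x) false
  have hpw : (PySem.List.sorted path (fun x => x) false).Pairwise (· ≤ ·) := by
    simpa using PySem.List.sorted_pairwise path (fun x => x)
  simp only [hslice]
  rw [show ((PySem.List.sorted path (fun x => x) false).zip
        (PySem.List.sorted path (fun x => x) false).tail).all
        (fun p => !(p.1 == p.2 && strIslower p.1))
      = !(((PySem.List.sorted path (fun x => x) false).zip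
        (PySem.List.sorted path (fun x => x) false).tail).any
        (fun p => p.1 == p.2 && strIslower p.1)) by
    simp [List.all_eq_not_any_not]]
  congr 1
  rw [Bool.eq_iff_iff]
  rw [zipAny_iff _ hpw]
  simp only [List.any_eq_true, Bool.and_eq_true, decide_eq_true_eq, PySem.List.count_eq]
  constructor
  · rintro ⟨cav, hm, hcnt, hl⟩
    have hce := hperm.count_eq cav
    refine ⟨cav, List.duplicate_iff_sublist.mp
      (List.duplicate_iff_two_le_count.mpr (by omega)), hl⟩
  · rintro ⟨c, hsub, hl⟩
    have h2 := List.duplicate_iff_two_le_count.mp (List.duplicate_iff_sublist.mpr hsub)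
    have hce := hperm.count_eq c
    exact ⟨c, List.count_pos_iff.mp (by omega), by omega, hl⟩


-- the guard conditions of A and B agree
theorem cond_eq (cave : String) (path : List String) :
    ((cave == "end" && PySem.List.count path "end" == 0) || !strIslower cave)
      = (!strIslower cave || (cave == "end" && !path.contains "end")) := by
  rw [Bool.or_comm]
  congr 1
  rw [Bool.eq_iff_iff]
  simp [PySem.List.count_eq, List.count_eq_zero]

-- ===== VERDICT (by name: the statement is the Claim_ definition above) =====
theorem isEligible_spec : Claim_equal_isEligible := by
  intro cave path _
  unfold Spec_isEligible isEligible isEligible_alt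
  rw [cond_eq]
  split
  · rfl
  · split
    · rfl
    · cases hc : path.contains cave
      · simp
      · simp only [Bool.not_true, Bool.false_eq_true, if_false, if_true]
        rw [loopA_eq, key]
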